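-- pv_equiv track=rewrite | github.com/jargonPY/Blockchain | prime_generator.py | low_prime
-- ===== SOURCE A (Python) =====
-- def low_prime(n):
--
--     low = [3,5,7,11,13,17,19,23,29,31,37,41,43,47,53,59,61,67,71,73,79,83,89,97
--                    ,101,103,107,109,113,127,131,137,139,149,151,157,163,167,173,179
--                    ,181,191,193,197,199,211,223,227,229,233,239,241,251,257,263,269
--                    ,271,277,281,283,293,307,311,313,317,331,337,347,349,353,359,367
--                    ,373,379,383,389,397,401,409,419,421,431,433,439,443,449,457,461
--                    ,463,467,479,487,491,499,503,509,521,523,541,547,557,563,569,571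
--                    ,577,587,593,599,601,607,613,617,619,631,641,643,647,653,659,661
--                    ,673,677,683,691,701,709,719,727,733,739,743,751,757,761,769,773
--                    ,787,797,809,811,821,823,827,829,839,853,857,859,863,877,881,883
--                    ,887,907,911,919,929,937,941,947,953,967,971,977,983,991,997]
--
--     for i in low:
--         if n % i == 0:
--             return False
--     return True
-- ===== SOURCE B (Python) =====
-- # Product of all the odd primes below 1000 (the exact prime set A scans),
-- # kept as a single precomputed constant.
-- _P = 9795170322499541715631254099103190523061986195294684111941302664484333158189935330925975824394741160798114779557718009574594764862607633364146141495426324511681365696202008969571005479130696817479735741878598360836121705033559258113830566567596244424494957446078594154339948437568719759669451984047452774875193203553016918293330341769600505817958950019952247532601649874771492996567334907402659237040290603945562955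
--
-- def low_prime(n):
--     # _P is squarefree, so gcd(|n|, _P) == 1 iff no listed prime divides n.
--     a, b = abs(n), _P
--     while b:
--         a, b = b, a % b
--     return a == 1
-- ===== Notes on version B (the rewrite author's own statement) =====
-- stated objective: alternative
-- what changed: Replaces the scan of trial divisions n % p over the prime list by a single Euclidean gcd of |n| with the precomputed product of those primes (squarefree, so gcd > 1 iff some listed prime divides n).
import Mathlib
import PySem

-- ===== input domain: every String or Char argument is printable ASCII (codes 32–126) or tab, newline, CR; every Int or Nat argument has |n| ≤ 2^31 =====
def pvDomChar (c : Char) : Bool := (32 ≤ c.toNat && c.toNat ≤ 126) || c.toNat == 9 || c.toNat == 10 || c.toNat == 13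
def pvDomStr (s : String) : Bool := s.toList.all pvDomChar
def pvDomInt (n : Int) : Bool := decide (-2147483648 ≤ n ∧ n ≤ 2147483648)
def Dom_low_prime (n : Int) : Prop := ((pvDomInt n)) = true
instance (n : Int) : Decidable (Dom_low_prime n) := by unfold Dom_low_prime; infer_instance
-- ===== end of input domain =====

-- B replaces A's scan of trial divisions over the prime list by one Euclidean
-- gcd of |n| with the precomputed product of those primes (squarefree, so
-- gcd > 1 iff some listed prime divides n).

-- ===== PORT A =====
-- the literal list of small primes from A
def lowList : List Int := [3,5,7,11,13,17,19,23,29,31,37,41,43,47,53,59,61,67,71,73,79,83,89,97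
  ,101,103,107,109,113,127,131,137,139,149,151,157,163,167,173,179
  ,181,191,193,197,199,211,223,227,229,233,239,241,251,257,263,269
  ,271,277,281,283,293,307,311,313,317,331,337,347,349,353,359,367
  ,373,379,383,389,397,401,409,419,421,431,433,439,443,449,457,461
  ,463,467,479,487,491,499,503,509,521,523,541,547,557,563,569,571
  ,577,587,593,599,601,607,613,617,619,631,641,643,647,653,659,661
  ,673,677,683,691,701,709,719,727,733,739,743,751,757,761,769,773
  ,787,797,809,811,821,823,827,829,839,853,857,859,863,877,881,883
  ,887,907,911,919,929,937,941,947,953,967,971,977,983,991,997]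

-- A's loop with early return: 'for i in low: if n % i == 0: return False'
def lowLoop (n : Int) : List Int → Bool
  | [] => true
  | i :: rest => if PySem.Int.mod n i == 0 then false else lowLoop n rest

def low_prime (n : Int) : Bool := lowLoop n lowList

-- ===== PORT B =====
-- '_P = <literal>' : the precomputed product constant from Source B
def lowProd : Nat := 9795170322499541715631254099103190523061986195294684111941302664484333158189935330925975824394741160798114779557718009574594764862607633364146141495426324511681365696202008969571005479130696817479735741878598360836121705033559258113830566567596244424494957446078594154339948437568719759669451984047452774875193203553016918293330341769600505817958950019952247532601649874771492996567334907402659237040290603945562955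

-- 'while b: a, b = b, a % b' on nonnegative Python ints, ported as Nat
def euclid (a b : Nat) : Nat :=
  if b = 0 then a else euclid b (a % b)
decreasing_by exact Nat.mod_lt _ (Nat.pos_of_ne_zero (by assumption))

def low_prime_alt (n : Int) : Bool := euclid n.natAbs lowProd == 1

-- ===== PRECONDITION & SPEC =====
def Spec_low_prime (n : Int) (out : Bool) : Prop := out = low_prime_alt n
instance (n : Int) (out : Bool) : Decidable (Spec_low_prime n out) := by unfold Spec_low_prime; infer_instance

-- ===== CLAIM (what is proved, stated in full; the proofs are below) =====
def Claim_equal_low_prime : Prop := ∀ (n : Int), Dom_low_prime n → Spec_low_prime n (low_prime n)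

-- ===== LEMMAS AND PROOFS =====

set_option maxRecDepth 4000

-- A's primes as Nat, used only by the proof
def lowListN : List Nat := [3,5,7,11,13,17,19,23,29,31,37,41,43,47,53,59,61,67,71,73,79,83,89,97
  ,101,103,107,109,113,127,131,137,139,149,151,157,163,167,173,179
  ,181,191,193,197,199,211,223,227,229,233,239,241,251,257,263,269
  ,271,277,281,283,293,307,311,313,317,331,337,347,349,353,359,367
  ,373,379,383,389,397,401,409,419,421,431,433,439,443,449,457,461
  ,463,467,479,487,491,499,503,509,521,523,541,547,557,563,569,571
  ,577,587,593,599,601,607,613,617,619,631,641,643,647,653,659,661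
  ,673,677,683,691,701,709,719,727,733,739,743,751,757,761,769,773
  ,787,797,809,811,821,823,827,829,839,853,857,859,863,877,881,883
  ,887,907,911,919,929,937,941,947,953,967,971,977,983,991,997]

theorem euclid_eq_gcd (b a : Nat) : euclid a b = Nat.gcd b a := by
  induction b using Nat.strong_induction_on generalizing a with
  | _ b ih =>
    rw [euclid]
    by_cases hb : b = 0
    · simp [hb]
    · rw [if_neg hb, ih (a % b) (Nat.mod_lt _ (Nat.pos_of_ne_zero hb)),
        Nat.gcd_rec b a]

theorem lowLoop_eq_true {n : Int} {l : List Int} :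
    lowLoop n l = true ↔ ∀ i ∈ l, ¬ i ∣ n := by
  induction l with
  | nil => simp [lowLoop]
  | cons i rest ih =>
    simp only [lowLoop, List.mem_cons]
    by_cases h : i ∣ n
    · simp [(PySem.Int.mod_eq_zero_iff_dvd n i).mpr h, h]
    · have : PySem.Int.mod n i ≠ 0 := fun h0 =>
        h ((PySem.Int.mod_eq_zero_iff_dvd n i).mp h0)
      simp [this, ih, h]

theorem all_low_prime : ∀ p ∈ lowListN, Nat.Prime p := by
  intro p hp; fin_cases hp <;> norm_num

theorem lowList_cast : lowList = List.map (fun p : Nat => (p : Int)) lowListN := by decide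

theorem lowProd_eq : lowListN.foldl (· * ·) 1 = lowProd := by decide

theorem coprime_foldl (k : Nat) (l : List Nat) (acc : Nat) :
    Nat.Coprime k (l.foldl (· * ·) acc) ↔ Nat.Coprime k acc ∧ ∀ p ∈ l, Nat.Coprime k p := by
  induction l generalizing acc with
  | nil => simp
  | cons p rest ih =>
    simp only [List.foldl_cons, ih, Nat.coprime_mul_iff_right, List.mem_cons]
    constructor
    · rintro ⟨⟨h1, h2⟩, h3⟩
      exact ⟨h1, fun q hq => hq.elim (fun e => e ▸ h2) (h3 q)⟩
    · rintro ⟨h1, h2⟩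
      exact ⟨⟨h1, h2 p (Or.inl rfl)⟩, fun q hq => h2 q (Or.inr hq)⟩

theorem key (n : Int) :
    (∀ p ∈ lowListN, ¬ (p : Int) ∣ n) ↔ Nat.Coprime n.natAbs lowProd := by
  rw [← lowProd_eq, coprime_foldl]
  constructor
  · intro h
    refine ⟨Nat.coprime_one_right _, fun p hp => ?_⟩
    rw [Nat.coprime_comm]
    refine (Nat.Prime.coprime_iff_not_dvd (all_low_prime p hp)).mpr fun hd => ?_
    exact h p hp (Int.natAbs_dvd_natAbs.mp (by simpa using hd))
  · rintro ⟨-, h⟩ p hp hd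
    exact (Nat.Prime.coprime_iff_not_dvd (all_low_prime p hp)).mp
      (Nat.coprime_comm.mp (h p hp)) (by simpa using Int.natAbs_dvd_natAbs.mpr hd)

-- ===== VERDICT (by name: the statement is the Claim_ definition above) =====
theorem low_prime_spec : Claim_equal_low_prime := by
  intro n _
  show low_prime n = low_prime_alt n
  have : low_prime n = true ↔ low_prime_alt n = true := by
    rw [low_prime, low_prime_alt, lowLoop_eq_true, lowList_cast, euclid_eq_gcd, beq_iff_eq]
    rw [List.forall_mem_map, key]
    exact Nat.coprime_comm
  exact Bool.eq_iff_iff.mpr this
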